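-- pv_equiv track=rewrite | github.com/meithan/AoC25 | day10/day10.py | solve
-- ===== SOURCE A (Python) =====
-- import queue
--
-- def solve(machine):
--   target_state, buttons = machine
--   start = 0
--   Q = queue.Queue()
--   explored = set()
--   explored.add(start)
--   Q.put([start, []])
--   while not Q.empty():
--     state, hist = Q.get()
--     if state == target_state:
--       return hist
--     for button in buttons:
--       next_state = state ^ button
--       if next_state not in explored:
--         explored.add(next_state)
--         next_hist = hist + [button]
--         Q.put([next_state, next_hist])
-- ===== SOURCE B (Python) =====
-- from collections import deque
--
-- def solve(machine):
--   # Same FIFO BFS over XOR-reachable states, but stores one parent link per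
--   # discovered state instead of a full history per queue entry; the button
--   # sequence is rebuilt by walking parent links when the target is dequeued.
--   target_state, buttons = machine
--   start = 0
--   parent = {start: None}
--   Q = deque([start])
--   while Q:
--     state = Q.popleft()
--     if state == target_state:
--       seq = []
--       cur = state
--       while parent[cur] is not None:
--         prev, button = parent[cur]
--         seq.append(button)
--         cur = prev
--       seq.reverse()
--       return seq
--     for button in buttons:
--       next_state = state ^ button
--       if next_state not in parent:
--         parent[next_state] = (state, button)
--         Q.append(next_state)
--   return None
-- ===== Notes on version B (the rewrite author's own statement) =====
-- stated objective: simpler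
-- what changed: The BFS queue carries bare states with a single parent-link dict (state -> (previous_state, button)) instead of copying a full history list into every queue entry; the answer is rebuilt once by walking parent links backwards and reversing.
import Mathlib
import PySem

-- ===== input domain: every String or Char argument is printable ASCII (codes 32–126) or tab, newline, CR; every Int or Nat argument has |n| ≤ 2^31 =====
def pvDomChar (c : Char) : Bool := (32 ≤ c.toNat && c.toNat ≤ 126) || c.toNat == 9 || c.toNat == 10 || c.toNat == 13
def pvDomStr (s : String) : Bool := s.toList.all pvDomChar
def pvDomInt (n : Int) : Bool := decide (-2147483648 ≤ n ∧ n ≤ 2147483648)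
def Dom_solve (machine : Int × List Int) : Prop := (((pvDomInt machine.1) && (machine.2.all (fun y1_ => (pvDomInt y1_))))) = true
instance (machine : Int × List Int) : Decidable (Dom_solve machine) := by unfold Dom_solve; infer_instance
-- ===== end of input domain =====

-- B replaces per-queue-entry history lists with one parent-link dict and a final
-- reconstruction walk (objective: simpler).

-- ===== PORT A =====
-- A's while loop: FIFO queue of (state, hist) pairs; fuel bounds the number of
-- iterations (the BFS visits at most 2^|buttons| XOR-reachable states, so the
-- fuel 2^|buttons| + 1 is never exhausted; Python's loop always terminates).
def solveLoopA (target : Int) (buttons : List Int) :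
    Nat → List (Int × List Int) → PySem.Set Int → Option (List Int)
  | 0, _, _ => none
  | _ + 1, [], _ => none
  | fuel + 1, (state, hist) :: rest, explored =>
    if state = target then some hist
    else
      let step := buttons.foldl
        (fun (acc : List (Int × List Int) × PySem.Set Int) button =>
          let ns := PySem.Int.bxor state button
          if acc.2.contains ns then acc
          else (acc.1 ++ [(ns, hist ++ [button])], PySem.Set.add acc.2 ns))
        (rest, explored)
      solveLoopA target buttons fuel step.1 step.2

def solve (machine : Int × List Int) : Option (List Int) :=
  solveLoopA machine.1 machine.2 (2 ^ machine.2.length + 1)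
    [(0, [])] (PySem.Set.add PySem.Set.empty 0)

-- ===== PORT B =====
-- B's inner reconstruction while loop: walk parent links back to the start;
-- fuel = parent.size + 1 bounds the chain length (each link goes to an earlier
-- discovered state, so the chain is shorter than the number of dict entries).
def rebuildLoop (parent : PySem.Dict Int (Option (Int × Int))) :
    Nat → Int → List Int → List Int
  | 0, _, acc => acc
  | fuel + 1, cur, acc =>
    match parent.get? cur with
    | some (some pb) => rebuildLoop parent fuel pb.1 (acc ++ [pb.2])
    | _ => acc

-- B's while loop: FIFO queue of bare states; parent dict maps each discovered
-- state to some (previous_state, button), and the start to none.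
def solveLoopB (target : Int) (buttons : List Int) :
    Nat → List Int → PySem.Dict Int (Option (Int × Int)) → Option (List Int)
  | 0, _, _ => none
  | _ + 1, [], _ => none
  | fuel + 1, state :: rest, parent =>
    if state = target then
      some (rebuildLoop parent (parent.size + 1) state []).reverse
    else
      let step := buttons.foldl
        (fun (acc : List Int × PySem.Dict Int (Option (Int × Int))) button =>
          let ns := PySem.Int.bxor state button
          if acc.2.contains ns then acc
          else (acc.1 ++ [ns], acc.2.insert ns (some (state, button))))
        (rest, parent)
      solveLoopB target buttons fuel step.1 step.2

def solve_alt (machine : Int × List Int) : Option (List Int) :=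
  solveLoopB machine.1 machine.2 (2 ^ machine.2.length + 1)
    [0] (PySem.Dict.insert PySem.Dict.empty 0 none)

-- ===== PRECONDITION & SPEC =====
def Spec_solve (machine : Int × List Int) (out : Option (List Int)) : Prop := out = solve_alt machine
instance (machine : Int × List Int) (out : Option (List Int)) : Decidable (Spec_solve machine out) := by unfold Spec_solve; infer_instance

-- ===== CLAIM (what is proved, stated in full; the proofs are below) =====
def Claim_equal_solve : Prop := ∀ (machine : Int × List Int), Dom_solve machine → Spec_solve machine (solve machine)

-- ===== LEMMAS AND PROOFS =====

-- the parent chain of state s spells the history h (buttons from start to s)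
inductive Chain (d : PySem.Dict Int (Option (Int × Int))) : Int → List Int → Prop
  | nil (s : Int) : d.get? s = some none → Chain d s []
  | cons (s p b : Int) (h : List Int) :
      d.get? s = some (some (p, b)) → Chain d p h → Chain d s (h ++ [b])

theorem Chain.insert_fresh {d : PySem.Dict Int (Option (Int × Int))} {s : Int} {h : List Int}
    (hc : Chain d s h) (k : Int) (v : Option (Int × Int)) (hk : d.get? k = none) :
    Chain (d.insert k v) s h := by
  induction hc with
  | nil s hs =>
    refine Chain.nil s ?_
    rw [PySem.Dict.get?_insert_of_ne _ _ (by rintro rfl; rw [hk] at hs; simp at hs)]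
    exact hs
  | cons s p b h hs _ ih =>
    refine Chain.cons s p b h ?_ ih
    rw [PySem.Dict.get?_insert_of_ne _ _ (by rintro rfl; rw [hk] at hs; simp at hs)]
    exact hs

theorem rebuild_of_chain {d : PySem.Dict Int (Option (Int × Int))} {s : Int} {h : List Int}
    (hc : Chain d s h) : ∀ (fuel : Nat) (acc : List Int), h.length < fuel →
    rebuildLoop d fuel s acc = acc ++ h.reverse := by
  induction hc with
  | nil s hs =>
    intro fuel acc hf
    match fuel, hf with
    | f + 1, _ => simp [rebuildLoop, hs]
  | cons s p b h hs _ ih =>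
    intro fuel acc hf
    match fuel, hf with
    | f + 1, hf =>
      have : h.length < f := by simp at hf; omega
      simp [rebuildLoop, hs, ih f (acc ++ [b]) this]

-- the loop invariant tying A's (queue, explored) to B's (queue, parent)
def BfsInv (qA : List (Int × List Int)) (ex : PySem.Set Int)
    (qB : List Int) (d : PySem.Dict Int (Option (Int × Int))) : Prop :=
  qB = qA.map Prod.fst ∧
  (∀ p ∈ qA, Chain d p.1 p.2 ∧ p.2.length + 1 ≤ d.size) ∧
  (∀ x : Int, ex.contains x = d.contains x)

theorem set_contains_add (s : PySem.Set Int) (n x : Int) (h : s.contains n = false) :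
    (PySem.Set.add s n).contains x = (x == n || s.contains x) := by
  have hn : n ∉ s := by
    intro hm
    rw [(PySem.Set.contains_iff s n).mpr hm] at h; cases h
  simp [PySem.Set.add, hn, PySem.Set.contains_eq_listContains]
  by_cases hx : x = n <;> simp [hx]

theorem fold_inv (state : Int) (hist : List Int) :
    ∀ (buttons : List Int) (qA : List (Int × List Int)) (ex : PySem.Set Int)
      (qB : List Int) (d : PySem.Dict Int (Option (Int × Int))),
      BfsInv qA ex qB d → Chain d state hist → hist.length + 1 ≤ d.size →
      BfsInv
        (buttons.foldl
          (fun (acc : List (Int × List Int) × PySem.Set Int) button =>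
            let ns := PySem.Int.bxor state button
            if acc.2.contains ns then acc
            else (acc.1 ++ [(ns, hist ++ [button])], PySem.Set.add acc.2 ns))
          (qA, ex)).1
        (buttons.foldl
          (fun (acc : List (Int × List Int) × PySem.Set Int) button =>
            let ns := PySem.Int.bxor state button
            if acc.2.contains ns then acc
            else (acc.1 ++ [(ns, hist ++ [button])], PySem.Set.add acc.2 ns))
          (qA, ex)).2
        (buttons.foldl
          (fun (acc : List Int × PySem.Dict Int (Option (Int × Int))) button =>
            let ns := PySem.Int.bxor state button
            if acc.2.contains ns then acc
            else (acc.1 ++ [ns], acc.2.insert ns (some (state, button))))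
          (qB, d)).1
        (buttons.foldl
          (fun (acc : List Int × PySem.Dict Int (Option (Int × Int))) button =>
            let ns := PySem.Int.bxor state button
            if acc.2.contains ns then acc
            else (acc.1 ++ [ns], acc.2.insert ns (some (state, button))))
          (qB, d)).2 ∧
      Chain (buttons.foldl
          (fun (acc : List Int × PySem.Dict Int (Option (Int × Int))) button =>
            let ns := PySem.Int.bxor state button
            if acc.2.contains ns then acc
            else (acc.1 ++ [ns], acc.2.insert ns (some (state, button))))
          (qB, d)).2 state hist ∧
      hist.length + 1 ≤ ((buttons.foldl
          (fun (acc : List Int × PySem.Dict Int (Option (Int × Int))) button =>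
            let ns := PySem.Int.bxor state button
            if acc.2.contains ns then acc
            else (acc.1 ++ [ns], acc.2.insert ns (some (state, button))))
          (qB, d)).2).size := by
  intro buttons
  induction buttons with
  | nil => intro qA ex qB d hinv hc hsz; exact ⟨hinv, hc, hsz⟩
  | cons b bs ih =>
    intro qA ex qB d hinv hc hsz
    obtain ⟨hmap, hent, hcont⟩ := hinv
    by_cases hns : d.contains (PySem.Int.bxor state b) = true
    · have hex : ex.contains (PySem.Int.bxor state b) = true := by rw [hcont]; exact hns
      simp only [List.foldl_cons, hns, hex, if_true]
      exact ih qA ex qB d ⟨hmap, hent, hcont⟩ hc hsz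
    · have hd : d.contains (PySem.Int.bxor state b) = false := by simpa using hns
      have hex : ex.contains (PySem.Int.bxor state b) = false := by rw [hcont]; exact hd
      have hget : d.get? (PySem.Int.bxor state b) = none :=
        (PySem.Dict.get?_eq_none_iff_contains d _).mpr hd
      have hsize' : (d.insert (PySem.Int.bxor state b) (some (state, b))).size = d.size + 1 := by
        rw [PySem.Dict.size_insert]; simp [hd]
      have hc' : Chain (d.insert (PySem.Int.bxor state b) (some (state, b))) state hist :=
        hc.insert_fresh _ _ hget
      simp only [List.foldl_cons, hns, hex, if_false, Bool.false_eq_true]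
      refine ih _ _ _ _ ⟨by simp [hmap], ?_, ?_⟩ hc' (by omega)
      · intro p hp
        rcases List.mem_append.mp hp with hp | hp
        · obtain ⟨hpc, hpl⟩ := hent p hp
          exact ⟨hpc.insert_fresh _ _ hget, by omega⟩
        · simp only [List.mem_singleton] at hp
          subst hp
          refine ⟨Chain.cons _ state b hist (PySem.Dict.get?_insert_self _ _ _) hc', ?_⟩
          simp; omega
      · intro x
        rw [set_contains_add ex _ x hex, PySem.Dict.contains_insert, hcont x]

theorem loop_eq (target : Int) (buttons : List Int) : ∀ (fuel : Nat)
    (qA : List (Int × List Int)) (ex : PySem.Set Int)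
    (qB : List Int) (d : PySem.Dict Int (Option (Int × Int))),
    BfsInv qA ex qB d →
    solveLoopA target buttons fuel qA ex = solveLoopB target buttons fuel qB d := by
  intro fuel
  induction fuel with
  | zero => intro qA ex qB d _; rfl
  | succ f ih =>
    intro qA ex qB d hinv
    obtain ⟨hmap, hent, hcont⟩ := hinv
    match qA, hmap with
    | [], hmap =>
      simp only [List.map_nil] at hmap
      subst hmap
      rfl
    | (s, h) :: rest, hmap =>
      simp only [List.map_cons] at hmap
      subst hmap
      simp only [solveLoopA, solveLoopB]
      by_cases ht : s = target
      · obtain ⟨hch, hlen⟩ := hent (s, h) (List.mem_cons_self ..)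
        rw [rebuild_of_chain hch (d.size + 1) [] (by omega)]
        simp [ht]
      · simp only [ht, if_false]
        have hrest : BfsInv rest ex (rest.map Prod.fst) d :=
          ⟨rfl, fun p hp => hent p (List.mem_cons_of_mem _ hp), hcont⟩
        obtain ⟨hch, hlen⟩ := hent (s, h) (List.mem_cons_self ..)
        obtain ⟨hinv', _, _⟩ := fold_inv s h buttons rest ex (rest.map Prod.fst) d hrest hch hlen
        exact ih _ _ _ _ hinv'

-- ===== VERDICT (by name: the statement is the Claim_ definition above) =====
theorem solve_spec : Claim_equal_solve := by
  intro machine _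
  unfold Spec_solve solve solve_alt
  apply loop_eq
  refine ⟨rfl, ?_, ?_⟩
  · intro p hp
    simp only [List.mem_singleton] at hp
    subst hp
    constructor
    · exact Chain.nil 0 (PySem.Dict.get?_insert_self _ _ _)
    · simp [PySem.Dict.size, PySem.Dict.insert, PySem.Dict.empty]
  · intro x
    by_cases hx : x = (0 : Int)
    · simp [PySem.Set.add, PySem.Set.empty, PySem.Set.contains, PySem.Dict.contains,
        PySem.Dict.insert, PySem.Dict.empty, hx]
    · simp only [PySem.Set.add, PySem.Set.empty, PySem.Set.contains, PySem.Dict.contains,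
        PySem.Dict.insert, PySem.Dict.empty]
      simp [hx]
      exact fun h => hx h.symm
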